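-- pv_equiv track=rewrite | github.com/lugia574/algorism | venv/BeakZoon_1157_spelling.py | spelling_cheak
-- ===== SOURCE A (Python) =====
-- def spelling_cheak(sp):
--     ans = ''
--     ans2 = ''
--     dic = {}
--     max_cnt = 0
--     max_cnt2 = 0
--
--     for i in range(len(sp)):
--         sp[i] = sp[i].upper()
--
--     for sp in sp:
--         if sp in dic:
--             dic[sp] += 1
--
--         else:
--             dic[sp] = 1
--
--     for key,val in dic.items():
--
--         if max_cnt < val:
--             max_cnt = val
--             ans = key
--
--         elif max_cnt == val:
--             ans2 = key
--             max_cnt2 = val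
--
--
--     if max_cnt == max_cnt2:
--         ans = '?'
--
--     return ans
-- ===== SOURCE B (Python) =====
-- def spelling_cheak(sp):
--     for i in range(len(sp)):
--         sp[i] = sp[i].upper()
--     cnt = {}
--     for s in sp:
--         cnt[s] = cnt.get(s, 0) + 1
--     if not cnt:
--         return '?'
--     m = max(cnt.values())
--     winners = [k for k, v in cnt.items() if v == m]
--     return winners[0] if len(winners) == 1 else '?'
-- ===== Notes on version B (the rewrite author's own statement) =====
-- stated objective: simpler
-- what changed: A's single running-max scan with stale tie registers (ans2/max_cnt2) and a final register comparison is replaced by computing the maximum count with max() and collecting all keys attaining it; the answer is the sole winner or '?' when there are several (or none).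
import Mathlib
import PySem

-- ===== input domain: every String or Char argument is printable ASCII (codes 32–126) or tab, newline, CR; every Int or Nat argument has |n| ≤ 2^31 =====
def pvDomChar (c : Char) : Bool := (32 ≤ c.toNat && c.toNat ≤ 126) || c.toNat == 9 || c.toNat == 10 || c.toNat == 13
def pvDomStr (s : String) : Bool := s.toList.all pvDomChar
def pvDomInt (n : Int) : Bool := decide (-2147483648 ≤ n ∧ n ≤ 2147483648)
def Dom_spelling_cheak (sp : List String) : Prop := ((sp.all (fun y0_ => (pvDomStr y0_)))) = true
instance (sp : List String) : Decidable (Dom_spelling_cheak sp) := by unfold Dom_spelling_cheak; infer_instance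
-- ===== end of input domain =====

-- B replaces A's running-max scan with stale tie registers by max-of-counts plus a winner filter ('simpler').
-- NOTE: the Python A uppercases the list `sp` IN PLACE (observable mutation); B performs the same mutation;
-- the equivalence proved here is about the RETURN value.

-- ===== PORT A =====
def spelling_cheak (sp : List String) : String :=
  -- for i in range(len(sp)): sp[i] = sp[i].upper()   (index always in range, so pyGetD's default is never used; i ≥ 0 so .toNat is exact)
  let sp := (PySem.List.pyRange 0 (sp.length : Int) 1).foldl
      (fun l i => l.set i.toNat (PySem.Str.upper (PySem.List.pyGetD l i ""))) sp
  -- for sp in sp: if sp in dic: dic[sp] += 1 else: dic[sp] = 1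
  let dic := sp.foldl
      (fun d s => if d.contains s then d.modify s 0 (fun v => v + 1) else d.insert s 1)
      (PySem.Dict.empty : PySem.Dict String Int)
  -- for key, val in dic.items(): …   state = (ans, ans2, max_cnt, max_cnt2)
  let st := dic.items.foldl
      (fun st kv =>
        if st.2.2.1 < kv.2 then (kv.1, st.2.1, kv.2, st.2.2.2)
        else if st.2.2.1 == kv.2 then (st.1, kv.1, st.2.2.1, kv.2)
        else st)
      (("", "", 0, 0) : String × String × Int × Int)
  if st.2.2.1 == st.2.2.2 then "?" else st.1

-- ===== PORT B =====
def spelling_cheak_alt (sp : List String) : String :=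
  -- for i in range(len(sp)): sp[i] = sp[i].upper()   (same in-place loop as A's Python)
  let sp := (PySem.List.pyRange 0 (sp.length : Int) 1).foldl
      (fun l i => l.set i.toNat (PySem.Str.upper (PySem.List.pyGetD l i ""))) sp
  -- for s in sp: cnt[s] = cnt.get(s, 0) + 1
  let cnt := sp.foldl (fun d s => d.insert s (d.getD s 0 + 1))
      (PySem.Dict.empty : PySem.Dict String Int)
  if cnt.size == 0 then "?"
  else
    -- m = max(cnt.values())   (cnt nonempty here, so max? is some and the default is never used)
    let m := (PySem.List.max? cnt.values (fun v => v)).getD 0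
    -- winners = [k for k, v in cnt.items() if v == m]
    let winners := (cnt.items.filter (fun kv => kv.2 == m)).map (fun kv => kv.1)
    -- winners[0] if len(winners) == 1 else '?'   (winners nonempty when its length is 1, default unused)
    if winners.length == 1 then winners.headD "" else "?"

-- ===== PRECONDITION & SPEC =====
def Spec_spelling_cheak (sp : List String) (out : String) : Prop := out = spelling_cheak_alt sp
instance (sp : List String) (out : String) : Decidable (Spec_spelling_cheak sp out) := by unfold Spec_spelling_cheak; infer_instance

-- ===== CLAIM (what is proved, stated in full; the proofs are below) =====
def Claim_equal_spelling_cheak : Prop := ∀ (sp : List String), Dom_spelling_cheak sp → Spec_spelling_cheak sp (spelling_cheak sp)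

-- ===== LEMMAS AND PROOFS =====

-- A's counter step equals B's counter step on every dict.
lemma counter_step_eq (d : PySem.Dict String Int) (s : String) :
    (if d.contains s then d.modify s 0 (fun v => v + 1) else d.insert s 1)
      = d.insert s (d.getD s 0 + 1) := by
  by_cases h : d.contains s = true
  · simp [h, PySem.Dict.modify]
  · have hc : d.getD s 0 = 0 := PySem.Dict.getD_of_not_contains d 0 (by simpa using h)
    rw [hc]
    norm_num
    simp [h]

-- every value of the counter dict is ≥ 1
lemma counter_values_pos (l : List String) (d : PySem.Dict String Int)
    (hd : ∀ p ∈ d.items, 1 ≤ p.2) :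
    ∀ p ∈ (l.foldl (fun d s => d.insert s (d.getD s 0 + 1)) d).items, 1 ≤ p.2 := by
  induction l generalizing d with
  | nil => simpa using hd
  | cons s t ih =>
    refine ih _ ?_
    intro p hp
    rcases (PySem.Dict.mem_items_insert _ _ _ _).1 hp with h | h
    · subst h
      have h0 : 0 ≤ d.getD s 0 := by
        rw [PySem.Dict.getD_eq_get?_getD]
        cases hg : d.get? s with
        | none => simp
        | some v =>
          have : (s, v) ∈ d.items := by
            unfold PySem.Dict.get? at hg
            rcases Option.map_eq_some_iff.1 hg with ⟨pr, hf, hv⟩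
            have hmem := List.mem_of_find?_eq_some hf
            have hk := List.find?_some hf
            obtain ⟨k', v'⟩ := pr
            simp at hk hv
            subst hk; subst hv; exact hmem
          have := hd _ this
          simp at this ⊢
          omega
      simp
      omega
    · exact hd _ h.1

-- running max of the counts
def pvM (l : List (String × Int)) : Int := l.foldl (fun m p => max m p.2) 0

def pvStep (st : String × String × Int × Int) (kv : String × Int) : String × String × Int × Int :=
  if st.2.2.1 < kv.2 then (kv.1, st.2.1, kv.2, st.2.2.2)
  else if st.2.2.1 == kv.2 then (st.1, kv.1, st.2.2.1, kv.2)
  else st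

-- characterisation of A's third loop on a list of positive counts
lemma loop_char (l : List (String × Int)) (hpos : ∀ p ∈ l, 1 ≤ p.2) :
    (l.foldl pvStep ("", "", 0, 0)).2.2.1 = pvM l ∧
    (l.foldl pvStep ("", "", 0, 0)).2.2.2 ≤ pvM l ∧
    (∀ q ∈ l, q.2 ≤ pvM l) ∧
    (l ≠ [] → (l.filter (fun p => p.2 == pvM l)) ≠ [] ∧
      (l.foldl pvStep ("", "", 0, 0)).1 = ((l.filter (fun p => p.2 == pvM l)).headD ("", 0)).1) ∧
    ((l.foldl pvStep ("", "", 0, 0)).2.2.2 = (l.foldl pvStep ("", "", 0, 0)).2.2.1 ↔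
      (l = [] ∨ 2 ≤ (l.filter (fun p => p.2 == pvM l)).length)) := by
  induction l using List.reverseRecOn with
  | nil => simp [pvM]
  | append_singleton l p ih =>
    have hposl : ∀ q ∈ l, 1 ≤ q.2 := fun q hq => hpos q (List.mem_append_left _ hq)
    have hp : 1 ≤ p.2 := hpos p (List.mem_append_right _ (by simp))
    obtain ⟨h1, h2, h3, h4, h5⟩ := ih hposl
    simp only [List.foldl_append, List.foldl_cons, List.foldl_nil]
    set st := l.foldl pvStep ("", "", 0, 0) with hst
    have hMapp : pvM (l ++ [p]) = max (pvM l) p.2 := by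
      simp [pvM, List.foldl_append]
    by_cases hlt : st.2.2.1 < p.2
    · have hstep : pvStep st p = (p.1, st.2.1, p.2, st.2.2.2) := by
        simp [pvStep, hlt]
      have hMp : pvM (l ++ [p]) = p.2 := by
        rw [hMapp]; exact max_eq_right (by rw [← h1]; omega)
      have hfl : l.filter (fun q => q.2 == p.2) = [] := by
        refine List.filter_eq_nil_iff.2 (fun q hq => ?_)
        have := h3 q hq
        rw [h1] at hlt
        simp only [beq_iff_eq]
        omega
      have hfilter : (l ++ [p]).filter (fun q => q.2 == p.2) = [p] := by
        rw [List.filter_append, hfl]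
        simp
      rw [hstep, hMp, hfilter]
      dsimp only
      rw [h1] at hlt
      refine ⟨rfl, by omega, ?_, ?_, ?_⟩
      · intro q hq
        rcases List.mem_append.1 hq with h | h
        · have := h3 q h; omega
        · simp at h; subst h; omega
      · intro _
        simp
      · constructor
        · intro hcontra
          omega
        · rintro (h | h)
          · simp at h
          · simp at h
    · by_cases heq : st.2.2.1 = p.2
      · have hstep : pvStep st p = (st.1, p.1, st.2.2.1, p.2) := by
          simp [pvStep, hlt, heq]
        have hl : l ≠ [] := by
          intro h
          rw [h] at h1
          simp [pvM] at h1
          omega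
        obtain ⟨hfne, hans⟩ := h4 hl
        have hp2 : p.2 = pvM l := by omega
        have hM : pvM (l ++ [p]) = pvM l := by
          rw [hMapp, hp2, max_self]
        have hfilter : (l ++ [p]).filter (fun q => q.2 == pvM l) =
            l.filter (fun q => q.2 == pvM l) ++ [p] := by
          rw [List.filter_append]
          simp [hp2]
        obtain ⟨a, t, hat⟩ := List.exists_cons_of_ne_nil hfne
        rw [hstep, hM, hfilter]
        dsimp only
        refine ⟨by omega, by omega, ?_, ?_, ?_⟩
        · intro q hq
          rcases List.mem_append.1 hq with h | h
          · have := h3 q h; omega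
          · simp at h; subst h; omega
        · intro _
          rw [hat]
          refine ⟨by simp, ?_⟩
          rw [hans, hat]
          simp
        · constructor
          · intro _
            right
            rw [hat]
            simp
          · intro _
            omega
      · have hgt : p.2 < st.2.2.1 := by omega
        have hstep : pvStep st p = st := by
          simp [pvStep, hlt, heq]
        have hl : l ≠ [] := by
          intro h
          rw [h] at h1
          simp [pvM] at h1
          omega
        have hM : pvM (l ++ [p]) = pvM l := by
          rw [hMapp]
          exact max_eq_left (by omega)
        have hfilter : (l ++ [p]).filter (fun q => q.2 == pvM l) =
            l.filter (fun q => q.2 == pvM l) := by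
          rw [List.filter_append]
          have hne : p.2 ≠ pvM l := by omega
          simp [hne]
        rw [hstep, hM, hfilter]
        refine ⟨h1, h2, ?_, fun _ => h4 hl, ?_⟩
        · intro q hq
          rcases List.mem_append.1 hq with h | h
          · exact h3 q h
          · simp at h; subst h; omega
        · rw [h5]
          simp [hl]

-- ===== VERDICT (by name: the statement is the Claim_ definition above) =====
-- positive counts of the counter dict (instantiated at Dict.empty)
lemma counter_pos_main (l : List String) :
    ∀ p ∈ (l.foldl (fun d s => d.insert s (d.getD s 0 + 1))
        (PySem.Dict.empty : PySem.Dict String Int)).items, 1 ≤ p.2 := by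
  refine counter_values_pos l _ ?_
  intro p hp
  simp [PySem.Dict.empty] at hp

theorem spelling_cheak_spec : Claim_equal_spelling_cheak := by
  unfold Claim_equal_spelling_cheak
  intro sp _
  unfold Spec_spelling_cheak spelling_cheak spelling_cheak_alt
  dsimp only
  set l2 := (PySem.List.pyRange 0 (sp.length : Int) 1).foldl
      (fun l i => l.set i.toNat (PySem.Str.upper (PySem.List.pyGetD l i ""))) sp with hl2
  have hcnt : (fun (d : PySem.Dict String Int) (s : String) =>
      if d.contains s then d.modify s 0 (fun v => v + 1) else d.insert s 1)
      = (fun (d : PySem.Dict String Int) (s : String) => d.insert s (d.getD s 0 + 1)) :=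
    funext fun d => funext fun s => counter_step_eq d s
  rw [hcnt]
  set cnt := l2.foldl (fun d s => d.insert s (d.getD s 0 + 1))
      (PySem.Dict.empty : PySem.Dict String Int) with hcntd
  set L := cnt.items with hLdef
  have hpos : ∀ p ∈ L, 1 ≤ p.2 := counter_pos_main l2
  obtain ⟨h1, h2, h3, h4, h5⟩ := loop_char L hpos
  have hps : (fun (st : String × String × Int × Int) (kv : String × Int) =>
      if st.2.2.1 < kv.2 then (kv.1, st.2.1, kv.2, st.2.2.2)
      else if st.2.2.1 == kv.2 then (st.1, kv.1, st.2.2.1, kv.2)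
      else st) = pvStep := rfl
  rw [hps]
  set st := L.foldl pvStep ("", "", 0, 0) with hstdef
  have hsz : cnt.size = L.length := rfl
  have hv : cnt.values = L.map (fun x => x.2) := rfl
  by_cases hLnil : L = []
  · have hst0 : st = ("", "", 0, 0) := by rw [hstdef, hLnil]; rfl
    rw [hst0, hsz, hLnil]
    simp
  · obtain ⟨hfne, hans⟩ := h4 hLnil
    obtain ⟨q, hqmem, hq2⟩ : ∃ q ∈ L, q.2 = pvM L := by
      obtain ⟨a, t, hat⟩ := List.exists_cons_of_ne_nil hfne
      have ha : a ∈ L.filter (fun p => p.2 == pvM L) := by rw [hat]; simp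
      exact ⟨a, (List.mem_filter.1 ha).1, by simpa using (List.mem_filter.1 ha).2⟩
    have hmax : PySem.List.max? cnt.values (fun v => v) = some (pvM L) := by
      cases h : PySem.List.max? cnt.values (fun v => v) with
      | none =>
        rw [PySem.List.max?_eq_none_iff] at h
        rw [hv] at h
        simp [hLnil] at h
      | some m0 =>
        have hm0mem := PySem.List.max?_mem h
        have hub := PySem.List.max?_isMax h
        rw [hv] at hm0mem
        obtain ⟨q0, hq0, hq0v⟩ := List.mem_map.1 hm0mem
        have hle : m0 ≤ pvM L := by rw [← hq0v]; exact h3 q0 hq0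
        have hge : pvM L ≤ m0 := by
          refine hub (pvM L) ?_
          rw [hv]
          exact List.mem_map.2 ⟨q, hqmem, hq2⟩
        exact congrArg some (le_antisymm hle hge)
    have hszne : (cnt.size == 0) = false := by
      rw [hsz]
      simp [hLnil]
    rw [hszne, hmax]
    simp only [Bool.false_eq_true, if_false, Option.getD_some]
    set W := L.filter (fun kv => kv.2 == pvM L) with hW
    have hlen : (W.map (fun kv => kv.1)).length = W.length := by simp
    by_cases hw : W.length = 1
    · have hne2 : ¬ (st.2.2.2 = st.2.2.1) := by
        rw [h5]
        push Not
        refine ⟨hLnil, ?_⟩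
        omega
      have hbeq : (st.2.2.1 == st.2.2.2) = false := by
        simp only [beq_eq_false_iff_ne, ne_eq]
        exact fun h => hne2 h.symm
      rw [hbeq]
      simp only [Bool.false_eq_true, if_false]
      have hwl : ((W.map (fun kv => kv.1)).length == 1) = true := by
        rw [hlen]
        simpa using hw
      rw [hwl]
      simp only [if_true]
      obtain ⟨a, t, hat⟩ := List.exists_cons_of_ne_nil hfne
      rw [hans, hat]
      simp
    · have hge2 : 2 ≤ W.length := by
        have := List.length_pos_of_ne_nil hfne
        omega
      have hst2 : st.2.2.2 = st.2.2.1 := h5.2 (Or.inr hge2)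
      have hbeq : (st.2.2.1 == st.2.2.2) = true := by simpa using hst2.symm
      rw [hbeq]
      have hwl : ((W.map (fun kv => kv.1)).length == 1) = false := by
        rw [hlen]
        simpa using hw
      rw [hwl]
      simp
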